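-- pv_equiv track=rewrite | github.com/Matthew11K/Yandex-Algorithms | ydx_5.3.C.py | min_numbers_to_remove
-- ===== SOURCE A (Python) =====
-- def min_numbers_to_remove(n, a):
--     counts = {}
--     for number in a:
--         counts[number] = counts.get(number, 0) + 1
--
--     max_count = 0
--     for number in counts:
--         current_count = counts[number] + counts.get(number + 1, 0)
--         max_count = max(max_count, current_count)
--
--     return n - max_count
-- ===== SOURCE B (Python) =====
-- def min_numbers_to_remove(n, a):
--     # Sort, then a single two-pointer pass over runs of equal values,
--     # pairing a run with the immediately following run when its value is exactly +1.
--     s = sorted(a)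
--     best = 0
--     i = 0
--     while i < len(s):
--         j = i
--         while j < len(s) and s[j] == s[i]:
--             j += 1
--         cnt = j - i
--         if j < len(s) and s[j] == s[i] + 1:
--             k = j
--             while k < len(s) and s[k] == s[j]:
--                 k += 1
--             cnt += k - j
--         best = max(best, cnt)
--         i = j
--     return n - best
-- ===== Notes on version B (the rewrite author's own statement) =====
-- stated objective: alternative
-- what changed: Replaced A's hash-map of counts plus a second pass over all distinct keys (looking up key+1 each time) by sorting the list and making one two-pointer pass over the consecutive runs of equal values, pairing a run with the immediately following run when its value is exactly one larger.
import Mathlib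
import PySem

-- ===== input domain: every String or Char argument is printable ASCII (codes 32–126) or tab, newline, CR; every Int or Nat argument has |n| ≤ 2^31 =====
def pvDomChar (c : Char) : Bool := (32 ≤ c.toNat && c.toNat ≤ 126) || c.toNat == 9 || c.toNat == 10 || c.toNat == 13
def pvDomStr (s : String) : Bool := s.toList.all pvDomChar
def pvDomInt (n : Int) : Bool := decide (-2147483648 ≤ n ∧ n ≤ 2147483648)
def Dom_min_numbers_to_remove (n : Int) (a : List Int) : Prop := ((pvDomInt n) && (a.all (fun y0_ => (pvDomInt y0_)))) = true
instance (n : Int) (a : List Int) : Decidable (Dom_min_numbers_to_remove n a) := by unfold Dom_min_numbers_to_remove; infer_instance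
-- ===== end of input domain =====

-- B replaces A's dict-of-counts plus second dict pass by sort + one two-pointer pass over runs (alternative decomposition).


-- ===== PORT A =====
def min_numbers_to_remove (n : Int) (a : List Int) : Int :=
  let counts : PySem.Dict Int Int :=
    a.foldl (fun d number => d.insert number (d.getD number 0 + 1)) PySem.Dict.empty
  let max_count : Int :=
    counts.keys.foldl (fun max_count number =>
      max max_count (counts.getD number 0 + counts.getD (number + 1) 0)) 0
  n - max_count

-- ===== PORT B =====
-- the outer while loop of Source B: each step consumes one run of equal values
-- (the inner 'while … s[j] == s[i]: j += 1' advances over the run = takeWhile/dropWhile split)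
def pvScanRuns : List Int → Int → Int
  | [], best => best
  | x :: xs, best =>
      let t := xs.takeWhile (fun y => y == x)
      let rest := xs.dropWhile (fun y => y == x)
      let cnt : Int := 1 + t.length
      let cnt' : Int :=
        match rest with
        | y :: ys => if y = x + 1 then cnt + (1 + (ys.takeWhile (fun z => z == y)).length) else cnt
        | [] => cnt
      pvScanRuns rest (max best cnt')
  termination_by s _ => s.length
  decreasing_by
    simp only [List.length_cons]
    have := List.length_dropWhile_le (fun y => y == x) xs
    omega

def min_numbers_to_remove_alt (n : Int) (a : List Int) : Int :=
  n - pvScanRuns (PySem.List.sorted a (fun x => x) false) 0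

-- ===== PRECONDITION & SPEC =====
def Spec_min_numbers_to_remove (n : Int) (a : List Int) (out : Int) : Prop := out = min_numbers_to_remove_alt n a
instance (n : Int) (a : List Int) (out : Int) : Decidable (Spec_min_numbers_to_remove n a out) := by unfold Spec_min_numbers_to_remove; infer_instance

-- ===== CLAIM (what is proved, stated in full; the proofs are below) =====
def Claim_equal_min_numbers_to_remove : Prop := ∀ (n : Int) (a : List Int), Dom_min_numbers_to_remove n a → Spec_min_numbers_to_remove n a (min_numbers_to_remove n a)

-- ===== LEMMAS AND PROOFS =====

-- the distinct values of a (sorted) list, in the order pvScanRuns visits them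
def pvDvals : List Int → List Int
  | [] => []
  | x :: xs => x :: pvDvals (xs.dropWhile (fun y => y == x))
  termination_by s => s.length
  decreasing_by
    simp only [List.length_cons]
    have := List.length_dropWhile_le (fun y => y == x) xs
    omega

lemma pvDvals_subset : ∀ (s : List Int), ∀ v ∈ pvDvals s, v ∈ s := by
  intro s
  induction s using pvDvals.induct with
  | case1 => simp [pvDvals]
  | case2 x xs ih =>
    intro v hv
    rw [pvDvals] at hv
    rcases List.mem_cons.mp hv with h | h
    · simp [h]
    · exact List.mem_cons_of_mem _ ((List.dropWhile_sublist _).mem (ih v h))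

-- in a sorted list x :: xs, every element after the leading run of x is > x
lemma pv_rest_gt (x : Int) (xs : List Int) (h : (x :: xs).Pairwise (· ≤ ·)) :
    ∀ y ∈ xs.dropWhile (fun y => y == x), x < y := by
  intro y hy
  rcases List.pairwise_cons.mp h with ⟨hxle, hxs⟩
  cases hrest : xs.dropWhile (fun y => y == x) with
  | nil => rw [hrest] at hy; cases hy
  | cons y0 ys =>
    have hne : (y0 == x) = false := by
      have := List.head_dropWhile_not (fun y => y == x) (l := xs) (by simp [hrest])
      simpa [hrest] using this
    have hy0mem : y0 ∈ xs := (List.dropWhile_sublist _).mem (by rw [hrest]; exact List.mem_cons_self ..)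
    have hy0lt : x < y0 :=
      lt_of_le_of_ne (hxle _ hy0mem) (by simpa [eq_comm] using (beq_eq_false_iff_ne.mp hne))
    have hpw : (y0 :: ys).Pairwise (· ≤ ·) := hrest ▸ List.Pairwise.sublist (List.dropWhile_sublist _) hxs
    rw [hrest] at hy
    rcases List.mem_cons.mp hy with h | h
    · omega
    · exact lt_of_lt_of_le hy0lt ((List.pairwise_cons.mp hpw).1 _ h)

lemma pvDvals_mem (s : List Int) (hs : s.Pairwise (· ≤ ·)) (v : Int) :
    v ∈ pvDvals s ↔ v ∈ s := by
  induction s using pvDvals.induct with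
  | case1 => simp [pvDvals]
  | case2 x xs ih =>
    have hxs_eq : xs.takeWhile (fun y => y == x) ++ xs.dropWhile (fun y => y == x) = xs :=
      List.takeWhile_append_dropWhile
    have hpw : (xs.dropWhile (fun y => y == x)).Pairwise (· ≤ ·) :=
      List.Pairwise.sublist (List.dropWhile_sublist _) (List.pairwise_cons.mp hs).2
    rw [pvDvals]
    constructor
    · intro hv
      rcases List.mem_cons.mp hv with h | h
      · simp [h]
      · exact List.mem_cons_of_mem _ ((List.dropWhile_sublist _).mem ((ih hpw).mp h))
    · intro hv
      rcases List.mem_cons.mp hv with h | h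
      · simp [h]
      · rw [← hxs_eq] at h
        rcases List.mem_append.mp h with h | h
        · have := List.mem_takeWhile_imp h
          simp at this; simp [this]
        · exact List.mem_cons_of_mem _ ((ih hpw).mpr h)

lemma pvDvals_nodup (s : List Int) (hs : s.Pairwise (· ≤ ·)) : (pvDvals s).Nodup := by
  induction s using pvDvals.induct with
  | case1 => simp [pvDvals]
  | case2 x xs ih =>
    have hpw : (xs.dropWhile (fun y => y == x)).Pairwise (· ≤ ·) :=
      List.Pairwise.sublist (List.dropWhile_sublist _) (List.pairwise_cons.mp hs).2
    rw [pvDvals]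
    refine List.nodup_cons.mpr ⟨fun hmem => ?_, ih hpw⟩
    have hv := pvDvals_subset _ _ hmem
    exact absurd (pv_rest_gt x xs hs _ hv) (lt_irrefl x)

lemma pv_count_all_eq (t : List Int) (x v : Int) (h : ∀ y ∈ t, y = x) :
    t.count v = if v = x then t.length else 0 := by
  split_ifs with hv
  · subst hv; exact List.count_eq_length.mpr (fun b hb => (h b hb).symm)
  · exact List.count_eq_zero.mpr (fun hv' => hv (h v hv'))

lemma pv_count_zero_of_gt (l : List Int) (v : Int) (h : ∀ y ∈ l, v < y) : l.count v = 0 :=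
  List.count_eq_zero.mpr (fun hv => lt_irrefl v (h v hv))

lemma pv_count_run (x v : Int) (t rest : List Int) (ht : ∀ y ∈ t, y = x) :
    ((x :: (t ++ rest)).count v : Int) =
      (if v = x then 1 + (t.length : Int) else 0) + rest.count v := by
  have h1 : (x :: (t ++ rest)).count v = (t.count v + rest.count v) + (if x == v then 1 else 0) := by
    simp [List.count_cons, List.count_append]
  rw [h1, pv_count_all_eq t x v ht]
  by_cases hv : v = x
  · subst hv; simp; ring
  · have hbe : (x == v) = false := beq_eq_false_iff_ne.mpr (Ne.symm hv)
    simp [hv, hbe]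

def pvPairCnt (x : Int) : List Int → Int
  | y :: ys => if y = x + 1 then 1 + ((ys.takeWhile (fun z => z == y)).length : Int) else 0
  | [] => 0

lemma pv_match_eq (x c : Int) (r : List Int) :
    (match r with
     | y :: ys => if y = x + 1 then c + (1 + ((ys.takeWhile (fun z => z == y)).length : Int)) else c
     | [] => c) = c + pvPairCnt x r := by
  cases r with
  | nil => simp [pvPairCnt]
  | cons y ys => by_cases hy : y = x + 1 <;> simp [pvPairCnt, hy]

lemma pv_cx1 (x : Int) (rest : List Int) (hgt : ∀ y ∈ rest, x < y)
    (hpw : rest.Pairwise (· ≤ ·)) :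
    ((rest.count (x + 1) : Nat) : Int) = pvPairCnt x rest := by
  cases rest with
  | nil => simp [pvPairCnt]
  | cons y ys =>
    have hygt : x < y := hgt y (List.mem_cons_self ..)
    by_cases hy : y = x + 1
    · subst hy
      have hys_eq : ys.takeWhile (fun z => z == (x+1)) ++ ys.dropWhile (fun z => z == (x+1)) = ys :=
        List.takeWhile_append_dropWhile
      have hcr := pv_count_run (x+1) (x+1) (ys.takeWhile (fun z => z == (x+1)))
        (ys.dropWhile (fun z => z == (x+1)))
        (fun y hy => by have := List.mem_takeWhile_imp hy; simpa using this)
      rw [hys_eq] at hcr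
      have hgt2 : ∀ z ∈ ys.dropWhile (fun z => z == (x+1)), x + 1 < z :=
        pv_rest_gt (x+1) ys hpw
      have hz : (ys.dropWhile (fun z => z == (x+1))).count (x+1) = 0 :=
        pv_count_zero_of_gt _ _ hgt2
      rw [hcr]
      simp [pvPairCnt, hz]
    · have hall : ∀ z ∈ (y :: ys), x + 1 < z := by
        intro z hz
        rcases List.mem_cons.mp hz with h | h
        · omega
        · have := (List.pairwise_cons.mp hpw).1 _ h; omega
      have h0 := pv_count_zero_of_gt (y :: ys) (x+1) hall
      simp [pvPairCnt, if_neg hy, h0]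

lemma pv_scan_eq : ∀ (N : Nat) (s : List Int), s.length ≤ N → s.Pairwise (· ≤ ·) → ∀ b : Int,
    pvScanRuns s b =
      (pvDvals s).foldl (fun m v => max m ((s.count v : Int) + (s.count (v + 1) : Int))) b := by
  intro N
  induction N with
  | zero =>
    intro s hlen _ b
    cases s with
    | nil => simp [pvScanRuns, pvDvals]
    | cons x xs => simp at hlen
  | succ N ih =>
    intro s hlen hs b
    cases s with
    | nil => simp [pvScanRuns, pvDvals]
    | cons x xs =>
      have hxs_eq : xs.takeWhile (fun y => y == x) ++ xs.dropWhile (fun y => y == x) = xs :=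
        List.takeWhile_append_dropWhile
      set t := xs.takeWhile (fun y => y == x) with ht_def
      set rest := xs.dropWhile (fun y => y == x) with hrest_def
      have ht : ∀ y ∈ t, y = x := fun y hy => by
        have := List.mem_takeWhile_imp hy; simpa using this
      have hgt : ∀ y ∈ rest, x < y := pv_rest_gt x xs hs
      have hpw : rest.Pairwise (· ≤ ·) :=
        List.Pairwise.sublist (List.dropWhile_sublist _) (List.pairwise_cons.mp hs).2
      have hrest_len : rest.length ≤ N := by
        have h1 := List.length_dropWhile_le (fun y => y == x) xs
        rw [← hrest_def] at h1
        simp only [List.length_cons] at hlen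
        omega
      -- counts over the whole list, expressed through the run decomposition
      have hcount : ∀ v : Int, ((x :: xs).count v : Int) =
          (if v = x then 1 + (t.length : Int) else 0) + rest.count v := by
        intro v
        have := pv_count_run x v t rest ht
        rw [hxs_eq] at this
        exact this
      have hcx : ((x :: xs).count x : Int) = 1 + t.length := by
        rw [hcount x]
        have : rest.count x = 0 := pv_count_zero_of_gt rest x (fun y hy => hgt y hy)
        simp [this]
      have hcx1 : ((x :: xs).count (x + 1) : Int) = pvPairCnt x rest := by
        rw [hcount (x + 1)]
        have hne : ¬ (x + 1 = x) := by omega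
        rw [if_neg hne, pv_cx1 x rest hgt hpw]
        ring
      have hclater : ∀ v : Int, x < v → ((x :: xs).count v : Int) = rest.count v := by
        intro v hv
        rw [hcount v]
        have : ¬ (v = x) := by omega
        simp [this]
      rw [pvScanRuns, pvDvals]
      rw [pv_match_eq x (1 + (t.length : Int)) rest]
      rw [ih rest hrest_len hpw]
      rw [List.foldl_cons]
      have hinit : 1 + (t.length : Int) + pvPairCnt x rest =
          ((x :: xs).count x : Int) + ((x :: xs).count (x + 1) : Int) := by
        rw [hcx, hcx1]
      rw [hinit]
      apply PySem.List.foldl_congr_mem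
      intro acc v hv
      have hvrest := pvDvals_subset rest v hv
      have hvx : x < v := hgt v hvrest
      rw [hclater v hvx, hclater (v + 1) (by omega)]

lemma pv_A_eq (n : Int) (a : List Int) :
    min_numbers_to_remove n a =
      n - (PySem.Set.ofList a).foldl
            (fun m v => max m ((a.count v : Int) + (a.count (v + 1) : Int))) 0 := by
  unfold min_numbers_to_remove
  rw [PySem.Dict.foldl_insert_getD_add_one_eq_counter]
  simp [PySem.Dict.keys_counter, PySem.Dict.getD_counter]

-- ===== VERDICT (by name: the statement is the Claim_ definition above) =====
theorem min_numbers_to_remove_spec : Claim_equal_min_numbers_to_remove := by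
  intro n a _
  unfold Spec_min_numbers_to_remove min_numbers_to_remove_alt
  rw [pv_A_eq]
  set s := PySem.List.sorted a (fun x => x) false with hs_def
  have hpw : s.Pairwise (· ≤ ·) := by
    simpa using PySem.List.sorted_pairwise a (fun x => x)
  rw [pv_scan_eq s.length s (le_refl _) hpw 0]
  have hperm : s.Perm a := PySem.List.sorted_perm a (fun x => x) false
  have hcnt : ∀ v : Int, s.count v = a.count v := fun v => hperm.count_eq v
  have hfold : (pvDvals s).foldl
      (fun m v => max m ((s.count v : Int) + (s.count (v + 1) : Int))) 0 =
      (pvDvals s).foldl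
      (fun m v => max m ((a.count v : Int) + (a.count (v + 1) : Int))) 0 := by
    apply PySem.List.foldl_congr_mem
    intro acc v _
    rw [hcnt v, hcnt (v + 1)]
  rw [hfold]
  have hperm2 : (PySem.Set.ofList a).Perm (pvDvals s) := by
    rw [List.perm_ext_iff_of_nodup (PySem.Set.nodup_ofList a) (pvDvals_nodup s hpw)]
    intro v
    rw [PySem.Set.mem_ofList, pvDvals_mem s hpw]
    exact (hperm.mem_iff).symm
  have hrc : RightCommutative (fun (m : Int) (v : Int) =>
      max m ((a.count v : Int) + (a.count (v + 1) : Int))) :=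
    ⟨fun b x y => max_right_comm _ _ _⟩
  rw [@List.Perm.foldl_eq _ _ _ _ _ hrc hperm2 0]
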